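-- pv_equiv track=rewrite | github.com/elgerytme/Pynomaly | parse_todo.py | extract_layer_from_id
-- ===== SOURCE A (Python) =====
-- def extract_layer_from_id(task_id: str) -> str:
--     """Extract layer name from task ID prefix."""
--     layer_mapping = {
--         'D-': 'Domain',
--         'A-': 'Application',
--         'I-': 'Infrastructure',
--         'P-': 'Presentation',
--         'C-': 'CI/CD',
--         'DOC-': 'Documentation'
--     }
--
--     for prefix, layer in layer_mapping.items():
--         if task_id.startswith(prefix):
--             return layer
--     return 'Unknown'
-- ===== SOURCE B (Python) =====
-- def extract_layer_from_id(task_id: str) -> str: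
--     """Extract layer name from task ID prefix."""
--     layer_mapping = {
--         'D-': 'Domain',
--         'A-': 'Application',
--         'I-': 'Infrastructure',
--         'P-': 'Presentation',
--         'C-': 'CI/CD',
--         'DOC-': 'Documentation'
--     }
--
--     i = task_id.find('-')
--     if i == -1:
--         return 'Unknown'
--     return layer_mapping.get(task_id[:i + 1], 'Unknown')
-- ===== Notes on version B (the rewrite author's own statement) =====
-- stated objective: idiomatic
-- what changed: B replaces A's linear scan of six startswith tests by computing the key directly: the prefix up to and including the first '-' (or 'Unknown' when there is no dash) and a single dict .get lookup with default.
import Mathlib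
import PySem

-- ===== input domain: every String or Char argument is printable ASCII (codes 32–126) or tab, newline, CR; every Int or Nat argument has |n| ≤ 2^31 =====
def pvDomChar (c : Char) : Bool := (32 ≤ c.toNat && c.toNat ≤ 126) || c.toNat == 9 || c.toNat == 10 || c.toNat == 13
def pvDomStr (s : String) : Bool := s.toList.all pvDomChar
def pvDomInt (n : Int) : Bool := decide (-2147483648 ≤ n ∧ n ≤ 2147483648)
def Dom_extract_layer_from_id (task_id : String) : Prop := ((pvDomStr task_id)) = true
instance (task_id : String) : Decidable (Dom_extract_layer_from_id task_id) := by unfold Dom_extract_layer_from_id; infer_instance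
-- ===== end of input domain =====

-- B replaces A's linear scan of startswith tests by one keyed dict lookup of the
-- prefix up to (and including) the first '-'; objective: idiomatic, same cost.

-- ===== PORT A =====
-- the dict literal both Pythons build
def pvLayerMapping : PySem.Dict String String :=
  PySem.Dict.ofList
    [("D-", "Domain"), ("A-", "Application"), ("I-", "Infrastructure"),
     ("P-", "Presentation"), ("C-", "CI/CD"), ("DOC-", "Documentation")]

-- the 'for prefix, layer in layer_mapping.items()' loop with its early return
def pvScanLoop (t : String) : List (String × String) → String
  | [] => "Unknown"
  | (p, layer) :: rest => if PySem.Str.startswith t p then layer else pvScanLoop t rest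

def extract_layer_from_id (task_id : String) : String :=
  pvScanLoop task_id pvLayerMapping.items

-- ===== PORT B =====
def extract_layer_from_id_alt (task_id : String) : String :=
  let i := PySem.Str.find task_id "-"
  if i == -1 then "Unknown"
  else PySem.Dict.getD pvLayerMapping (PySem.Str.slice task_id none (some (i + 1))) "Unknown"

-- ===== PRECONDITION & SPEC =====
def Spec_extract_layer_from_id (task_id : String) (out : String) : Prop := out = extract_layer_from_id_alt task_id
instance (task_id : String) (out : String) : Decidable (Spec_extract_layer_from_id task_id out) := by unfold Spec_extract_layer_from_id; infer_instance

-- ===== CLAIM (what is proved, stated in full; the proofs are below) =====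
def Claim_equal_extract_layer_from_id : Prop := ∀ (task_id : String), Dom_extract_layer_from_id task_id → Spec_extract_layer_from_id task_id (extract_layer_from_id task_id)

-- ===== LEMMAS AND PROOFS =====

theorem pv_items : pvLayerMapping.items =
    [("D-", "Domain"), ("A-", "Application"), ("I-", "Infrastructure"),
     ("P-", "Presentation"), ("C-", "CI/CD"), ("DOC-", "Documentation")] := by decide

theorem pv_getD_none (k : String)
    (h1 : k ≠ "D-") (h2 : k ≠ "A-") (h3 : k ≠ "I-") (h4 : k ≠ "P-") (h5 : k ≠ "C-")
    (h6 : k ≠ "DOC-") :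
    PySem.Dict.getD pvLayerMapping k "Unknown" = "Unknown" := by
  apply PySem.Dict.getD_of_not_contains
  rw [PySem.Dict.contains_eq_decide_mem_keys]
  have hk : pvLayerMapping.keys = ["D-", "A-", "I-", "P-", "C-", "DOC-"] := by decide
  simp [hk, h1, h2, h3, h4, h5, h6]

-- if no mapped prefix starts task_id, B returns "Unknown"
theorem pv_alt_notfound (s : String)
    (h : ∀ p ∈ (["D-", "A-", "I-", "P-", "C-", "DOC-"] : List String),
      ¬ p.toList <+: s.toList) :
    extract_layer_from_id_alt s = "Unknown" := by
  have hdash : ("-" : String).toList = ['-'] := rfl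
  by_cases hi : PySem.Chars.find s.toList ['-'] = -1
  · simp only [extract_layer_from_id_alt, PySem.Str.find_eq, hdash]
    rw [if_pos (by simp [hi])]
  · have h0 : 0 ≤ PySem.Chars.find s.toList ['-'] := by
      have := PySem.Chars.neg_one_le_find s.toList ['-']
      omega
    obtain ⟨hpre, -⟩ := PySem.Chars.find_spec (s := s.toList) (sub := ['-']) h0
    set i := PySem.Chars.find s.toList ['-'] with hidef
    have hlt : i.toNat < s.toList.length := by
      have h1 := hpre.length_le
      rw [List.length_drop] at h1
      have h3 := PySem.Chars.find_le_length s.toList ['-']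
      simp only [List.length_cons, List.length_nil] at h1
      omega
    have hkey : (PySem.Str.slice s none (some (i + 1))).toList
        = s.toList.take (i.toNat + 1) := by
      rw [PySem.Str.toList_slice, PySem.Chars.slice_eq_listSlice,
        PySem.List.slice_to (xs := s.toList) (b := i + 1) (by omega)]
      congr 1
      omega
    simp only [extract_layer_from_id_alt, PySem.Str.find_eq, hdash]
    rw [← hidef, if_neg (by simp [hi])]
    apply pv_getD_none <;>
      (intro hk
       first
        | exact h "D-" (by simp) (by rw [← hk, hkey]; exact List.take_prefix _ _)
        | exact h "A-" (by simp) (by rw [← hk, hkey]; exact List.take_prefix _ _)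
        | exact h "I-" (by simp) (by rw [← hk, hkey]; exact List.take_prefix _ _)
        | exact h "P-" (by simp) (by rw [← hk, hkey]; exact List.take_prefix _ _)
        | exact h "C-" (by simp) (by rw [← hk, hkey]; exact List.take_prefix _ _)
        | exact h "DOC-" (by simp) (by rw [← hk, hkey]; exact List.take_prefix _ _))

-- ===== VERDICT (by name: the statement is the Claim_ definition above) =====
theorem extract_layer_from_id_spec : Claim_equal_extract_layer_from_id := by
  intro s _
  show extract_layer_from_id s = extract_layer_from_id_alt s
  rw [extract_layer_from_id, pv_items]
  have hdash : ("-" : String).toList = ['-'] := rfl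
  by_cases hD : PySem.Str.startswith s "D-"
  · obtain ⟨t, ht⟩ := (PySem.Chars.startswith_iff _ _).mp
      (by rw [← PySem.Str.startswith_eq]; exact hD)
    have hlist : s.toList = 'D' :: '-' :: t := by rw [← ht]; rfl
    have hfind : PySem.Chars.find s.toList ['-'] = 1 := by
      rw [hlist]
      simp [PySem.Chars.find, PySem.Chars.find.go, List.isPrefixOf]
    have hkey : PySem.Str.slice s none (some (1 + 1)) = "D-" := by
      apply String.toList_inj.mp
      rw [PySem.Str.toList_slice, PySem.Chars.slice_eq_listSlice,
        PySem.List.slice_to (xs := s.toList) (b := 1 + 1) (by omega), hlist]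
      rfl
    have hget : pvLayerMapping.getD "D-" "Unknown" = "Domain" := by decide
    simp only [pvScanLoop]
    rw [if_pos hD]
    simp only [extract_layer_from_id_alt, PySem.Str.find_eq, hdash]
    rw [hfind, if_neg (by decide), hkey, hget]
  by_cases hA : PySem.Str.startswith s "A-"
  · obtain ⟨t, ht⟩ := (PySem.Chars.startswith_iff _ _).mp
      (by rw [← PySem.Str.startswith_eq]; exact hA)
    have hlist : s.toList = 'A' :: '-' :: t := by rw [← ht]; rfl
    have hfind : PySem.Chars.find s.toList ['-'] = 1 := by
      rw [hlist]
      simp [PySem.Chars.find, PySem.Chars.find.go, List.isPrefixOf]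
    have hkey : PySem.Str.slice s none (some (1 + 1)) = "A-" := by
      apply String.toList_inj.mp
      rw [PySem.Str.toList_slice, PySem.Chars.slice_eq_listSlice,
        PySem.List.slice_to (xs := s.toList) (b := 1 + 1) (by omega), hlist]
      rfl
    have hget : pvLayerMapping.getD "A-" "Unknown" = "Application" := by decide
    simp only [pvScanLoop]
    rw [if_neg hD, if_pos hA]
    simp only [extract_layer_from_id_alt, PySem.Str.find_eq, hdash]
    rw [hfind, if_neg (by decide), hkey, hget]
  by_cases hI : PySem.Str.startswith s "I-"
  · obtain ⟨t, ht⟩ := (PySem.Chars.startswith_iff _ _).mp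
      (by rw [← PySem.Str.startswith_eq]; exact hI)
    have hlist : s.toList = 'I' :: '-' :: t := by rw [← ht]; rfl
    have hfind : PySem.Chars.find s.toList ['-'] = 1 := by
      rw [hlist]
      simp [PySem.Chars.find, PySem.Chars.find.go, List.isPrefixOf]
    have hkey : PySem.Str.slice s none (some (1 + 1)) = "I-" := by
      apply String.toList_inj.mp
      rw [PySem.Str.toList_slice, PySem.Chars.slice_eq_listSlice,
        PySem.List.slice_to (xs := s.toList) (b := 1 + 1) (by omega), hlist]
      rfl
    have hget : pvLayerMapping.getD "I-" "Unknown" = "Infrastructure" := by decide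
    simp only [pvScanLoop]
    rw [if_neg hD, if_neg hA, if_pos hI]
    simp only [extract_layer_from_id_alt, PySem.Str.find_eq, hdash]
    rw [hfind, if_neg (by decide), hkey, hget]
  by_cases hP : PySem.Str.startswith s "P-"
  · obtain ⟨t, ht⟩ := (PySem.Chars.startswith_iff _ _).mp
      (by rw [← PySem.Str.startswith_eq]; exact hP)
    have hlist : s.toList = 'P' :: '-' :: t := by rw [← ht]; rfl
    have hfind : PySem.Chars.find s.toList ['-'] = 1 := by
      rw [hlist]
      simp [PySem.Chars.find, PySem.Chars.find.go, List.isPrefixOf]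
    have hkey : PySem.Str.slice s none (some (1 + 1)) = "P-" := by
      apply String.toList_inj.mp
      rw [PySem.Str.toList_slice, PySem.Chars.slice_eq_listSlice,
        PySem.List.slice_to (xs := s.toList) (b := 1 + 1) (by omega), hlist]
      rfl
    have hget : pvLayerMapping.getD "P-" "Unknown" = "Presentation" := by decide
    simp only [pvScanLoop]
    rw [if_neg hD, if_neg hA, if_neg hI, if_pos hP]
    simp only [extract_layer_from_id_alt, PySem.Str.find_eq, hdash]
    rw [hfind, if_neg (by decide), hkey, hget]
  by_cases hC : PySem.Str.startswith s "C-"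
  · obtain ⟨t, ht⟩ := (PySem.Chars.startswith_iff _ _).mp
      (by rw [← PySem.Str.startswith_eq]; exact hC)
    have hlist : s.toList = 'C' :: '-' :: t := by rw [← ht]; rfl
    have hfind : PySem.Chars.find s.toList ['-'] = 1 := by
      rw [hlist]
      simp [PySem.Chars.find, PySem.Chars.find.go, List.isPrefixOf]
    have hkey : PySem.Str.slice s none (some (1 + 1)) = "C-" := by
      apply String.toList_inj.mp
      rw [PySem.Str.toList_slice, PySem.Chars.slice_eq_listSlice,
        PySem.List.slice_to (xs := s.toList) (b := 1 + 1) (by omega), hlist]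
      rfl
    have hget : pvLayerMapping.getD "C-" "Unknown" = "CI/CD" := by decide
    simp only [pvScanLoop]
    rw [if_neg hD, if_neg hA, if_neg hI, if_neg hP, if_pos hC]
    simp only [extract_layer_from_id_alt, PySem.Str.find_eq, hdash]
    rw [hfind, if_neg (by decide), hkey, hget]
  by_cases hDOC : PySem.Str.startswith s "DOC-"
  · obtain ⟨t, ht⟩ := (PySem.Chars.startswith_iff _ _).mp
      (by rw [← PySem.Str.startswith_eq]; exact hDOC)
    have hlist : s.toList = 'D' :: 'O' :: 'C' :: '-' :: t := by rw [← ht]; rfl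
    have hfind : PySem.Chars.find s.toList ['-'] = 3 := by
      rw [hlist]
      simp [PySem.Chars.find, PySem.Chars.find.go, List.isPrefixOf]
    have hkey : PySem.Str.slice s none (some (3 + 1)) = "DOC-" := by
      apply String.toList_inj.mp
      rw [PySem.Str.toList_slice, PySem.Chars.slice_eq_listSlice,
        PySem.List.slice_to (xs := s.toList) (b := 3 + 1) (by omega), hlist]
      rfl
    have hget : pvLayerMapping.getD "DOC-" "Unknown" = "Documentation" := by decide
    simp only [pvScanLoop]
    rw [if_neg hD, if_neg hA, if_neg hI, if_neg hP, if_neg hC, if_pos hDOC]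
    simp only [extract_layer_from_id_alt, PySem.Str.find_eq, hdash]
    rw [hfind, if_neg (by decide), hkey, hget]
  · have h : ∀ p ∈ (["D-", "A-", "I-", "P-", "C-", "DOC-"] : List String),
        ¬ p.toList <+: s.toList := by
      intro p hp hpre
      have hsw : ∀ q : String, q.toList <+: s.toList → PySem.Str.startswith s q = true := by
        intro q hq
        rw [PySem.Str.startswith_eq]
        exact (PySem.Chars.startswith_iff _ _).mpr hq
      simp only [List.mem_cons, List.not_mem_nil, or_false] at hp
      rcases hp with rfl | rfl | rfl | rfl | rfl | rfl
      · exact hD (hsw _ hpre)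
      · exact hA (hsw _ hpre)
      · exact hI (hsw _ hpre)
      · exact hP (hsw _ hpre)
      · exact hC (hsw _ hpre)
      · exact hDOC (hsw _ hpre)
    rw [pv_alt_notfound s h]
    simp only [pvScanLoop]
    rw [if_neg hD, if_neg hA, if_neg hI, if_neg hP, if_neg hC, if_neg hDOC]
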